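-- pv_equiv track=rewrite | github.com/tilmitt11191/dotfiles | sublime_text/Packages/rainbow_csv/main.py | get_field_by_line_position
-- ===== SOURCE A (Python) =====
-- def get_field_by_line_position(fields, delim_size, query_pos):
--     if not len(fields):
--         return None
--     col_num = 0
--     cpos = len(fields[col_num])
--     while query_pos > cpos and col_num + 1 < len(fields):
--         col_num += 1
--         cpos = cpos + delim_size + len(fields[col_num])
--     return col_num
-- ===== SOURCE B (Python) =====
-- from bisect import bisect_left
-- from itertools import accumulate
--
--
-- def get_field_by_line_position(fields, delim_size, query_pos):
--     if not fields:
--         return None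
--     ends = list(accumulate([len(fields[0])] + [delim_size + len(f) for f in fields[1:]]))
--     idx = bisect_left(ends, query_pos)
--     return min(idx, len(fields) - 1)
-- ===== Notes on version B (the rewrite author's own statement) =====
-- stated objective: alternative
-- what changed: Replaces the accumulate-and-compare while loop with a prefix table of cumulative field-end positions built once, followed by a binary search (bisect_left) and a final clamp to the last field index.
-- outside the precondition, e.g. on get_field_by_line_position(['aaaaa', 'aaa', 'x'], -7, 4): A returns 0, B returns 2
import Mathlib
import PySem

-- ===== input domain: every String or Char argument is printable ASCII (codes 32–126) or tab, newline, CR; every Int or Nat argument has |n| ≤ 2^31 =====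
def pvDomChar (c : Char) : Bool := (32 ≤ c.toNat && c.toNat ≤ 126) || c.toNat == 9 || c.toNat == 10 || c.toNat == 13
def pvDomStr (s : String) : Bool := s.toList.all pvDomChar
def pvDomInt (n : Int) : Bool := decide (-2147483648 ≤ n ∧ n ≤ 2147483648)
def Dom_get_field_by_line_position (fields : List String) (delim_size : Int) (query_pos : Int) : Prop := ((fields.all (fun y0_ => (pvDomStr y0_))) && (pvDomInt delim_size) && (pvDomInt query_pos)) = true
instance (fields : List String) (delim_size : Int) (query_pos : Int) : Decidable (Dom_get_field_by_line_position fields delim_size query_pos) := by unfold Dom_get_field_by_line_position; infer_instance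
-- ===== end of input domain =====

-- B replaces A's accumulate-and-compare while loop by a prefix table of cumulative
-- field-end positions plus a binary search (bisect_left) with a final clamp (objective: alternative).


-- ===== PORT A =====
-- the while loop: iterate over the fields after col_num, keeping cpos and col_num
def pvLoopA (delim_size query_pos : Int) : List String → Int → Int → Int
  | [], _, col_num => col_num
  | f :: rest, cpos, col_num =>
    if query_pos > cpos then
      pvLoopA delim_size query_pos rest (cpos + delim_size + PySem.Str.len f) (col_num + 1)
    else col_num

def get_field_by_line_position (fields : List String) (delim_size : Int) (query_pos : Int) : Option Int :=
  match fields with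
  | [] => none
  | f0 :: rest => some (pvLoopA delim_size query_pos rest (PySem.Str.len f0) 0)

-- ===== PORT B =====
-- itertools.accumulate (running sums) over a list of Ints
def pvAccum (acc : Int) : List Int → List Int
  | [] => []
  | x :: xs => (acc + x) :: pvAccum (acc + x) xs

def get_field_by_line_position_alt (fields : List String) (delim_size : Int) (query_pos : Int) : Option Int :=
  match fields with
  | f0 :: rest =>
    let ends := pvAccum 0 (PySem.Str.len f0 :: rest.map (fun f => delim_size + PySem.Str.len f))
    let idx : Int := (PySem.List.bisectLeft ends query_pos : Int)
    some (min idx ((fields.length : Int) - 1))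
  | [] => none

-- ===== PRECONDITION & SPEC =====
-- Pre_ excludes negative delim_size, which lies outside the natural domain (a delimiter's
-- length is ≥ 0): there the cumulative end positions are not monotone, so binary search is
-- not meaningful and B's answer may differ from A's linear scan.
def Pre_get_field_by_line_position (fields : List String) (delim_size : Int) (query_pos : Int) : Prop := 0 ≤ delim_size
instance (fields : List String) (delim_size : Int) (query_pos : Int) : Decidable (Pre_get_field_by_line_position fields delim_size query_pos) := by unfold Pre_get_field_by_line_position; infer_instance

def pvWitness_get_field_by_line_position : List String × Int × Int := (["ab", "c"], 1, 3)

def Spec_get_field_by_line_position (fields : List String) (delim_size : Int) (query_pos : Int) (out : Option Int) : Prop := out = get_field_by_line_position_alt fields delim_size query_pos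
instance (fields : List String) (delim_size : Int) (query_pos : Int) (out : Option Int) : Decidable (Spec_get_field_by_line_position fields delim_size query_pos out) := by unfold Spec_get_field_by_line_position; infer_instance

-- ===== CLAIM (what is proved, stated in full; the proofs are below) =====
def Claim_equal_get_field_by_line_position : Prop := ∀ (fields : List String) (delim_size : Int) (query_pos : Int), Dom_get_field_by_line_position fields delim_size query_pos → Pre_get_field_by_line_position fields delim_size query_pos → Spec_get_field_by_line_position fields delim_size query_pos (get_field_by_line_position fields delim_size query_pos)

-- ===== LEMMAS AND PROOFS =====

-- a list whose membership predicate agrees with "index < b" has countP = b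
lemma pv_countP_of_iff (p : Int → Bool) :
    ∀ (xs : List Int) (b : Nat), b ≤ xs.length →
      (∀ j (h : j < xs.length), p xs[j] = decide (j < b)) → xs.countP p = b := by
  intro xs
  induction xs with
  | nil =>
    intro b hb _
    have hb0 : b = 0 := Nat.le_zero.mp hb
    simp [hb0]
  | cons x xs ih =>
    intro b hb hiff
    have h0 := hiff 0 (by simp)
    match b with
    | 0 =>
      have hx : p x = false := by simpa using h0
      have htl : xs.countP p = 0 := by
        apply ih 0 (by omega)
        intro j hj
        have := hiff (j + 1) (by simp; omega)
        simpa using this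
      simp [hx, htl]
    | b + 1 =>
      have hx : p x = true := by simpa using h0
      have htl : xs.countP p = b := by
        apply ih b (by simp at hb; omega)
        intro j hj
        have := hiff (j + 1) (by simp; omega)
        simpa [Nat.succ_lt_succ_iff] using this
      simp [hx, htl]

-- cumulative sums of nonnegative increments are nondecreasing from the seed
lemma pv_pairwise_accum :
    ∀ (ds : List Int) (c : Int), (∀ d ∈ ds, 0 ≤ d) →
      (c :: pvAccum c ds).Pairwise (· ≤ ·) := by
  intro ds
  induction ds with
  | nil => intro c _; simp [pvAccum]
  | cons d ds ih =>
    intro c hd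
    have hd0 : 0 ≤ d := hd d (by simp)
    have htl := ih (c + d) (fun x hx => hd x (by simp [hx]))
    rw [pvAccum]
    rcases List.pairwise_cons.mp htl with ⟨hmem, hrest⟩
    refine List.pairwise_cons.mpr ⟨?_, htl⟩
    intro a ha
    rcases List.mem_cons.mp ha with h | h
    · omega
    · have := hmem a h; omega

-- on a sorted list, bisect_left returns the number of elements < x
lemma pv_countP_eq_bisectLeft (P : List Int) (x : Int) (h : P.Pairwise (· ≤ ·)) :
    P.countP (fun e => decide (e < x)) = PySem.List.bisectLeft P x := by
  obtain ⟨hle, hlt, hge⟩ := PySem.List.bisectLeft_spec P x h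
  apply pv_countP_of_iff _ _ _ hle
  intro j hj
  by_cases hjb : j < PySem.List.bisectLeft P x
  · simp [hlt j hj hjb, hjb]
  · have := hge j hj (by omega)
    simp [hjb]
    omega

-- A's loop equals the clamped count of cumulative end positions below query_pos
lemma pv_loopA_eq (delim q : Int) (hd : 0 ≤ delim) :
    ∀ (rest : List String) (cpos col : Int),
      pvLoopA delim q rest cpos col
        = col + ((min ((cpos :: pvAccum cpos (rest.map (fun f => delim + PySem.Str.len f))).countP
            (fun e => decide (e < q))) rest.length : Nat) : Int) := by
  intro rest
  induction rest with
  | nil => intro cpos col; simp [pvLoopA, pvAccum]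
  | cons f rest ih =>
    intro cpos col
    have hlen : (0 : Int) ≤ PySem.Str.len f := by
      simp [PySem.Str.len_eq]
    by_cases hq : q > cpos
    · rw [pvLoopA]
      simp only [hq, if_true]
      rw [ih]
      have hcpos : (decide (cpos < q)) = true := by simpa using hq
      simp only [List.map_cons, pvAccum, List.countP_cons, hcpos, List.length_cons]
      rw [show cpos + (delim + PySem.Str.len f) = cpos + delim + PySem.Str.len f from by ring]
      push_cast
      omega
    · rw [pvLoopA]
      simp only [hq, if_false]
      have hsorted := pv_pairwise_accum ((f :: rest).map (fun f => delim + PySem.Str.len f)) cpos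
        (by
          intro d hdm
          rcases List.mem_map.mp hdm with ⟨g, _, rfl⟩
          have : (0 : Int) ≤ PySem.Str.len g := by simp [PySem.Str.len_eq]
          omega)
      have hzero : ((cpos :: pvAccum cpos ((f :: rest).map (fun g => delim + PySem.Str.len g))).countP
          (fun e => decide (e < q))) = 0 := by
        apply List.countP_eq_zero.mpr
        intro a ha
        rcases List.mem_cons.mp ha with h | h
        · subst h; simpa using by omega
        · rcases List.pairwise_cons.mp hsorted with ⟨hmem, _⟩
          have := hmem a h
          simpa using by omega
      rw [hzero]
      simp

-- ===== VERDICT (by name: the statement is the Claim_ definition above) =====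
theorem get_field_by_line_position_spec : Claim_equal_get_field_by_line_position := by
  intro fields delim q _ hpre
  have hd : (0 : Int) ≤ delim := hpre
  unfold Spec_get_field_by_line_position
  match fields with
  | [] => rfl
  | f0 :: rest =>
    unfold get_field_by_line_position get_field_by_line_position_alt
    simp only []
    rw [pv_loopA_eq delim q hd rest (PySem.Str.len f0) 0]
    have hends : pvAccum 0 (PySem.Str.len f0 :: rest.map (fun f => delim + PySem.Str.len f))
        = PySem.Str.len f0 :: pvAccum (PySem.Str.len f0) (rest.map (fun f => delim + PySem.Str.len f)) := by
      simp [pvAccum]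
    rw [hends]
    have hsorted := pv_pairwise_accum (rest.map (fun f => delim + PySem.Str.len f)) (PySem.Str.len f0)
      (by
        intro d hdm
        rcases List.mem_map.mp hdm with ⟨g, _, rfl⟩
        have : (0 : Int) ≤ PySem.Str.len g := by simp [PySem.Str.len_eq]
        omega)
    rw [← pv_countP_eq_bisectLeft _ q hsorted]
    refine congrArg some ?_
    simp only [List.length_cons]
    push_cast
    omega
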